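-- pv_equiv track=rewrite | github.com/zura7cinco7/goa | Level 076/Homework/Homework.py | highest_rank
-- ===== SOURCE A (Python) =====
-- def highest_rank(arr):
--     result = [arr[0]]
--     first_int_count = arr.count(arr[0])
--     for num in arr[1:]:
--         if arr.count(num) > first_int_count:
--             first_int_count = arr.count(num)
--             result = [num]
--         elif arr.count(num) == first_int_count:
--             result.append(num)
--     return max(result)
-- ===== SOURCE B (Python) =====
-- def highest_rank(arr):
--     counts = {}
--     for x in arr:
--         counts[x] = counts.get(x, 0) + 1
--     best_v = arr[0]
--     best_c = 0
--     for v, c in counts.items():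
--         if c > best_c or (c == best_c and v > best_v):
--             best_v, best_c = v, c
--     return best_v
-- ===== Notes on version B (the rewrite author's own statement) =====
-- stated objective: faster
-- what changed: Replaces the quadratic loop of repeated arr.count scans with a single-pass dict of counts followed by one lexicographic (count, value) maximum over the distinct values.
import Mathlib
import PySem

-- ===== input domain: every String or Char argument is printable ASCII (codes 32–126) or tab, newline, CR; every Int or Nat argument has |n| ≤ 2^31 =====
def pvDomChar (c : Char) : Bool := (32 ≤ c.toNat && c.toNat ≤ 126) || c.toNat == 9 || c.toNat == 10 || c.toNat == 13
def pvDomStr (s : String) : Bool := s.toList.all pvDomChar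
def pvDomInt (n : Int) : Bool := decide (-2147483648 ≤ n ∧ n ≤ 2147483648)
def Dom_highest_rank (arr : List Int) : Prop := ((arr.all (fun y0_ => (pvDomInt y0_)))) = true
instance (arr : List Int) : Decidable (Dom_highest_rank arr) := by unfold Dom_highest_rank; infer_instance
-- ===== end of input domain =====

-- B replaces A's repeated arr.count scans by one counting pass over a dict plus one
-- lexicographic (count, value) maximum over the distinct values (objective: faster).

-- ===== PORT A =====
def highest_rank (arr : List Int) : Int :=
  match PySem.List.pyGet? arr 0 with
  | none => 0  -- indexing the first element raises IndexError on an empty list; excluded by Pre_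
  | some a0 =>
    let st := (PySem.List.slice arr (some 1) none).foldl
      (fun (s : List Int × Int) num =>
        if (arr.count num : Int) > s.2 then ([num], (arr.count num : Int))
        else if (arr.count num : Int) = s.2 then (s.1 ++ [num], s.2)
        else s)
      ([a0], (arr.count a0 : Int))
    (PySem.List.max? st.1 (fun y => y)).getD 0  -- max(result); result is never empty

-- ===== PORT B =====
def highest_rank_alt (arr : List Int) : Int :=
  let counts := arr.foldl (fun d x => d.insert x (d.getD x 0 + 1)) PySem.Dict.empty
  match PySem.List.pyGet? arr 0 with
  | none => 0  -- indexing the first element raises IndexError on an empty list; excluded by Pre_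
  | some a0 =>
    (counts.items.foldl
      (fun (p : Int × Int) (kv : Int × Int) =>
        if kv.2 > p.2 ∨ (kv.2 = p.2 ∧ kv.1 > p.1) then kv else p)
      (a0, 0)).1

-- ===== PRECONDITION & SPEC =====
-- Both programs index the first element, so both raise IndexError on the empty list.
def Pre_highest_rank (arr : List Int) : Prop := arr ≠ []
instance (arr : List Int) : Decidable (Pre_highest_rank arr) := by unfold Pre_highest_rank; infer_instance
def pvWitness_highest_rank : List Int := [3, 1, 3, 1, 2]

def Spec_highest_rank (arr : List Int) (out : Int) : Prop := out = highest_rank_alt arr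
instance (arr : List Int) (out : Int) : Decidable (Spec_highest_rank arr out) := by unfold Spec_highest_rank; infer_instance

-- ===== CLAIM (what is proved, stated in full; the proofs are below) =====
def Claim_equal_highest_rank : Prop := ∀ (arr : List Int), Dom_highest_rank arr → Pre_highest_rank arr → Spec_highest_rank arr (highest_rank arr)

-- ===== LEMMAS AND PROOFS =====

-- `r` is the value both programs compute: it occurs in arr and lexicographically
-- (count, value)-dominates every element of arr.
def IsAnswer (arr : List Int) (r : Int) : Prop :=
  r ∈ arr ∧ ∀ y ∈ arr, (arr.count y : Int) < (arr.count r : Int) ∨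
    ((arr.count y : Int) = (arr.count r : Int) ∧ y ≤ r)

theorem isAnswer_unique {arr : List Int} {r s : Int}
    (hr : IsAnswer arr r) (hs : IsAnswer arr s) : r = s := by
  obtain ⟨hrm, hrd⟩ := hr
  obtain ⟨hsm, hsd⟩ := hs
  rcases hrd s hsm with h | ⟨_, h⟩ <;> rcases hsd r hrm with h' | ⟨_, h'⟩ <;> omega

-- A's loop invariant on the processed elements `p`: `res`'s members are exactly the
-- processed values of count `c`, `c` bounds the counts of everything processed, and is attained.
def AInv (arr p res : List Int) (c : Int) : Prop :=
  (∀ y, y ∈ res ↔ (y ∈ p ∧ (arr.count y : Int) = c)) ∧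
  (∀ y ∈ p, (arr.count y : Int) ≤ c) ∧ (∃ y ∈ p, (arr.count y : Int) = c)

theorem A_loop (arr : List Int) :
    ∀ (rest p res : List Int) (c : Int), AInv arr p res c →
      AInv arr (p ++ rest)
        (rest.foldl (fun (s : List Int × Int) num =>
          if (arr.count num : Int) > s.2 then ([num], (arr.count num : Int))
          else if (arr.count num : Int) = s.2 then (s.1 ++ [num], s.2)
          else s) (res, c)).1
        (rest.foldl (fun (s : List Int × Int) num =>
          if (arr.count num : Int) > s.2 then ([num], (arr.count num : Int))
          else if (arr.count num : Int) = s.2 then (s.1 ++ [num], s.2)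
          else s) (res, c)).2 := by
  intro rest
  induction rest with
  | nil => intro p res c h; simpa using h
  | cons num rest ih =>
    intro p res c h
    obtain ⟨hmem, hub, hex⟩ := h
    have hstep : p ++ num :: rest = (p ++ [num]) ++ rest := by simp
    rw [hstep, List.foldl_cons]
    by_cases h1 : (arr.count num : Int) > c
    · simp only [if_pos h1]
      refine ih (p ++ [num]) [num] (arr.count num) ⟨?_, ?_, ⟨num, by simp⟩⟩
      · intro y
        simp only [List.mem_append, List.mem_singleton]
        constructor
        · rintro rfl; exact ⟨Or.inr rfl, rfl⟩
        · rintro ⟨hy | rfl, hcy⟩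
          · exact absurd hcy (by have := hub y hy; omega)
          · rfl
      · intro y hy
        rcases List.mem_append.mp hy with hy | hy
        · have := hub y hy; omega
        · simp only [List.mem_singleton] at hy; subst hy; exact le_refl _
    · by_cases h2 : (arr.count num : Int) = c
      · simp only [if_neg h1, if_pos h2]
        refine ih (p ++ [num]) (res ++ [num]) c ⟨?_, ?_, ?_⟩
        · intro y
          simp only [List.mem_append, List.mem_singleton, hmem y]
          constructor
          · rintro (⟨hy, hcy⟩ | rfl)
            · exact ⟨Or.inl hy, hcy⟩
            · exact ⟨Or.inr rfl, h2⟩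
          · rintro ⟨hy | rfl, hcy⟩
            · exact Or.inl ⟨hy, hcy⟩
            · exact Or.inr rfl
        · intro y hy
          rcases List.mem_append.mp hy with hy | hy
          · exact hub y hy
          · simp only [List.mem_singleton] at hy; subst hy; omega
        · obtain ⟨y, hy, hcy⟩ := hex; exact ⟨y, List.mem_append.mpr (Or.inl hy), hcy⟩
      · simp only [if_neg h1, if_neg h2]
        refine ih (p ++ [num]) res c ⟨?_, ?_, ?_⟩
        · intro y
          rw [hmem y]
          simp only [List.mem_append, List.mem_singleton]
          constructor
          · rintro ⟨hy, hcy⟩; exact ⟨Or.inl hy, hcy⟩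
          · rintro ⟨hy | rfl, hcy⟩
            · exact ⟨hy, hcy⟩
            · exact absurd hcy h2
        · intro y hy
          rcases List.mem_append.mp hy with hy | hy
          · exact hub y hy
          · simp only [List.mem_singleton] at hy; subst hy; omega
        · obtain ⟨y, hy, hcy⟩ := hex; exact ⟨y, List.mem_append.mpr (Or.inl hy), hcy⟩

-- lexicographic (count, value) order on (value, count) pairs
def lexLE (q p : Int × Int) : Prop := q.2 < p.2 ∨ (q.2 = p.2 ∧ q.1 ≤ p.1)

theorem B_loop : ∀ (l : List (Int × Int)) (p0 : Int × Int),
    (l.foldl (fun (p : Int × Int) (kv : Int × Int) =>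
        if kv.2 > p.2 ∨ (kv.2 = p.2 ∧ kv.1 > p.1) then kv else p) p0 = p0 ∨
     l.foldl (fun (p : Int × Int) (kv : Int × Int) =>
        if kv.2 > p.2 ∨ (kv.2 = p.2 ∧ kv.1 > p.1) then kv else p) p0 ∈ l) ∧
    lexLE p0 (l.foldl (fun (p : Int × Int) (kv : Int × Int) =>
        if kv.2 > p.2 ∨ (kv.2 = p.2 ∧ kv.1 > p.1) then kv else p) p0) ∧
    ∀ q ∈ l, lexLE q (l.foldl (fun (p : Int × Int) (kv : Int × Int) =>
        if kv.2 > p.2 ∨ (kv.2 = p.2 ∧ kv.1 > p.1) then kv else p) p0) := by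
  intro l
  induction l with
  | nil => intro p0; exact ⟨Or.inl rfl, Or.inr ⟨rfl, le_refl _⟩, by simp⟩
  | cons kv l ih =>
    intro p0
    simp only [List.foldl_cons]
    by_cases h : kv.2 > p0.2 ∨ (kv.2 = p0.2 ∧ kv.1 > p0.1)
    · simp only [if_pos h]
      obtain ⟨hm, hle, hall⟩ := ih kv
      refine ⟨?_, ?_, ?_⟩
      · rcases hm with hm | hm
        · exact Or.inr (List.mem_cons.mpr (Or.inl hm))
        · exact Or.inr (List.mem_cons.mpr (Or.inr hm))
      · unfold lexLE at hle ⊢; rcases h with h | h <;> rcases hle with hle | hle <;> omega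
      · intro q hq
        rcases List.mem_cons.mp hq with rfl | hq
        · exact hle
        · exact hall q hq
    · simp only [if_neg h]
      obtain ⟨hm, hle, hall⟩ := ih p0
      refine ⟨?_, hle, ?_⟩
      · rcases hm with hm | hm
        · exact Or.inl hm
        · exact Or.inr (List.mem_cons.mpr (Or.inr hm))
      · intro q hq
        rcases List.mem_cons.mp hq with rfl | hq
        · unfold lexLE at hle ⊢
          have hle2 : q.2 ≤ p0.2 := not_lt.mp (fun hh => h (Or.inl hh))
          by_cases heq : q.2 = p0.2
          · have hk1 : q.1 ≤ p0.1 := not_lt.mp (fun hh => h (Or.inr ⟨heq, hh⟩))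
            omega
          · omega
        · exact hall q hq

theorem highest_rank_isAnswer (arr : List Int) (h : arr ≠ []) :
    IsAnswer arr (highest_rank arr) := by
  obtain ⟨a0, t, rfl⟩ := List.exists_cons_of_ne_nil h
  have hget : PySem.List.pyGet? (a0 :: t) (0 : Int) = some a0 := by simp [pysem]
  have hslice : PySem.List.slice (a0 :: t) (some 1) none = t := by
    rw [PySem.List.slice_from_one, List.tail_cons]
  have hinv0 : AInv (a0 :: t) [a0] [a0] (((a0 :: t).count a0 : Int)) := by
    refine ⟨?_, ?_, ⟨a0, by simp⟩⟩
    · intro y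
      simp only [List.mem_singleton]
      constructor
      · rintro rfl; exact ⟨rfl, rfl⟩
      · rintro ⟨rfl, _⟩; rfl
    · intro y hy; simp only [List.mem_singleton] at hy; subst hy; exact le_refl _
  have hinv := A_loop (a0 :: t) t [a0] [a0] (((a0 :: t).count a0 : Int)) hinv0
  rw [List.singleton_append] at hinv
  obtain ⟨hmem, hub, hex⟩ := hinv
  unfold highest_rank
  rw [hget, hslice]
  simp only []
  obtain ⟨y0, hy0, hcy0⟩ := hex
  have hy0res := (hmem y0).mpr ⟨hy0, hcy0⟩
  cases hmax : PySem.List.max? (List.foldl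
      (fun (s : List Int × Int) num =>
        if ((a0 :: t).count num : Int) > s.2 then ([num], ((a0 :: t).count num : Int))
        else if ((a0 :: t).count num : Int) = s.2 then (s.1 ++ [num], s.2)
        else s) ([a0], (((a0 :: t).count a0 : Int))) t).1 (fun y => y) with
  | none =>
      rw [PySem.List.max?_eq_none_iff] at hmax
      rw [hmax] at hy0res
      exact absurd hy0res (List.not_mem_nil)
  | some m =>
      simp only [Option.getD_some]
      have hmmem := PySem.List.max?_mem hmax
      have hmax' := PySem.List.max?_isMax hmax
      obtain ⟨hmarr, hmc⟩ := (hmem m).mp hmmem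
      refine ⟨by simpa using hmarr, ?_⟩
      intro y hy
      by_cases hc : ((a0 :: t).count y : Int) = (List.foldl
          (fun (s : List Int × Int) num =>
            if ((a0 :: t).count num : Int) > s.2 then ([num], ((a0 :: t).count num : Int))
            else if ((a0 :: t).count num : Int) = s.2 then (s.1 ++ [num], s.2)
            else s) ([a0], (((a0 :: t).count a0 : Int))) t).2
      · have hyres := (hmem y).mpr ⟨hy, hc⟩
        exact Or.inr ⟨by omega, hmax' y hyres⟩
      · have := hub y hy
        exact Or.inl (by omega)

theorem highest_rank_alt_isAnswer (arr : List Int) (h : arr ≠ []) :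
    IsAnswer arr (highest_rank_alt arr) := by
  obtain ⟨a0, t, rfl⟩ := List.exists_cons_of_ne_nil h
  have hget : PySem.List.pyGet? (a0 :: t) (0 : Int) = some a0 := by simp [pysem]
  unfold highest_rank_alt
  rw [hget]
  simp only [PySem.Dict.foldl_insert_getD_add_one_eq_counter, PySem.Dict.items_counter]
  obtain ⟨hm, hle, hall⟩ := B_loop
    ((PySem.Set.ofList (a0 :: t)).map (fun k => (k, ((a0 :: t).count k : Int)))) (a0, 0)
  have ha0mem : ((a0 : Int), ((a0 :: t).count a0 : Int)) ∈
      (PySem.Set.ofList (a0 :: t)).map (fun k => (k, ((a0 :: t).count k : Int))) :=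
    List.mem_map.mpr ⟨a0, (PySem.Set.mem_ofList _ _).mpr (by simp), rfl⟩
  have hcnt0 : (0 : Int) < ((a0 :: t).count a0 : Int) := by
    have := List.count_pos_iff.mpr (List.mem_cons_self (l := t) (a := a0)); positivity
  have hlex0 := hall _ ha0mem
  rcases hm with hm | hm
  · unfold lexLE at hlex0
    rw [hm] at hlex0
    simp only at hlex0
    omega
  · obtain ⟨k, hk, hkeq⟩ := List.mem_map.mp hm
    have hkmem : k ∈ (a0 :: t) := (PySem.Set.mem_ofList _ _).mp hk
    rw [← hkeq]
    refine ⟨hkmem, ?_⟩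
    intro y hy
    have hylex := hall (y, ((a0 :: t).count y : Int))
      (List.mem_map.mpr ⟨y, (PySem.Set.mem_ofList _ _).mpr hy, rfl⟩)
    rw [← hkeq] at hylex
    unfold lexLE at hylex
    simp only at hylex ⊢
    exact hylex

-- ===== VERDICT (by name: the statement is the Claim_ definition above) =====
theorem highest_rank_spec : Claim_equal_highest_rank := by
  intro arr _ hpre
  unfold Spec_highest_rank
  exact isAnswer_unique (highest_rank_isAnswer arr hpre) (highest_rank_alt_isAnswer arr hpre)
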